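-- pv_equiv track=rewrite | github.com/goldwinsonick/tubes-daspro-2023 | recursion.py | appends
-- ===== SOURCE A (Python) =====
-- from typing import List, Union
--
-- def length(arr: List, lengthArray: int = -1) -> int:
--     panjang: int = 0
--     if lengthArray != -1:
--         return lengthArray
--     elif arr == []:
--         return 0
--     else:
--         while (arr[panjang] != None):
--             panjang += 1
--         return panjang
--
-- def findEmptyArrayIndex(arr: List, index: int = 0, lengthArray: int = -1) -> int:
--     arr_len: int = length(arr, lengthArray)
--     if index > arr_len:
--         return -99
--     elif arr[index] == None and (arr[-2] == None and arr[-1] == None):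
--         return index
--     else:
--         return findEmptyArrayIndex(arr, index + 1, arr_len)
--
-- def appends(arr: list, new_values: List, start_position: bool = False) -> List:
--     temp_new_arr:List = [None for i in range(length(arr)+2)]
--     if start_position == False:
--         # copy data dari array sebelumnya
--         for i in range(length(arr)):
--             temp_new_arr[i] = arr[i]
--         # Copy data baru dengan mark baru ke array sebelumnya
--         empty_index_array_temp_arr = findEmptyArrayIndex(temp_new_arr)
--         temp_new_arr[empty_index_array_temp_arr] = new_values
--         # Kembalikan ke array dengan data yang sudah update
--         arr = temp_new_arr
--     else:
--         for i in range(1, length(arr)+1):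
--             temp_new_arr[i] = arr[i-1]
--         # Copy data baru dengan mark baru ke candi_list sebelumnya
--         temp_new_arr[0] = new_values
--         # Kembalikan ke candi_list dengan data yang sudah update
--         arr :List= temp_new_arr
--     return arr
-- ===== SOURCE B (Python) =====
-- def appends(arr: list, new_values, start_position: bool = False) -> list:
--     # Direct construction: the insertion point is the index of the first None
--     # (the custom array's terminator); no allocate/copy/rescan passes.
--     n = arr.index(None) if arr else 0
--     if start_position == False:
--         return arr[:n] + [new_values, None]
--     else:
--         return [new_values] + arr[:n] + [None]
-- ===== Notes on version B (the rewrite author's own statement) =====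
-- stated objective: simpler
-- what changed: B builds the result directly as prefix-before-first-None plus the new value and terminator (one index() call and one slice), replacing A's allocate-a-None-buffer, element-by-element copy loop, and recursive findEmptyArrayIndex rescan.
import Mathlib
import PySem

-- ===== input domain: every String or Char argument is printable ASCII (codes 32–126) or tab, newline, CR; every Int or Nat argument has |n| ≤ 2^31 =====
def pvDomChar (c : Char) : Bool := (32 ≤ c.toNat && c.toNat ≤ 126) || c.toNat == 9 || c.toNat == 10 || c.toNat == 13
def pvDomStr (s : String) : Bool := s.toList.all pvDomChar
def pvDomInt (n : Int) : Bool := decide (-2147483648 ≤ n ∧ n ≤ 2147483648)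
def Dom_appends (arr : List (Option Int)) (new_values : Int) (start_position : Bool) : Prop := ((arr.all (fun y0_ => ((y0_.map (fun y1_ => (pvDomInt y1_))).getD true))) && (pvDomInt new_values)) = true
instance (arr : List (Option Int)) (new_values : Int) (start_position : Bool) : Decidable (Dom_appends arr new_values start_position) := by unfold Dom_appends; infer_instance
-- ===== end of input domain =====

-- B replaces A's allocate/copy-loop/recursive-rescan with a single direct construction
-- (prefix before the first None, then the new value and the None terminator): simpler, same cost.


-- ===== PORT A =====
-- the 'while arr[panjang] != None: panjang += 1' scan of length(); on a list with
-- no None Python raises IndexError (excluded by Pre_), here the scan just ends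
def pvScanLen : List (Option Int) → Nat
  | [] => 0
  | none :: _ => 0
  | some _ :: t => pvScanLen t + 1

def pvLengthA (arr : List (Option Int)) : Nat := if arr = [] then 0 else pvScanLen arr

-- findEmptyArrayIndex; the recursive calls carry the length already computed, exactly
-- as the Python passes lengthArray along.  Python's arr[index]/arr[-2]/arr[-1] raise on
-- out-of-range (pyGet? = none); all calls reached under Pre_ are in range.
def pvFindEmpty (arr : List (Option Int)) (index : Nat) (len : Nat) : Int :=
  if index > len then -99
  else if PySem.List.pyGet? arr (index : Int) = some none ∧
          PySem.List.pyGet? arr (-2) = some none ∧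
          PySem.List.pyGet? arr (-1) = some none then
    (index : Int)
  else pvFindEmpty arr (index + 1) len
termination_by len + 1 - index

def appends (arr : List (Option Int)) (new_values : Int) (start_position : Bool) : List (Option Int) :=
  let temp0 : List (Option Int) := List.replicate (pvLengthA arr + 2) none
  if start_position = false then
    let temp1 := (PySem.List.pyRange 0 (pvLengthA arr) 1).foldl
      (fun t i => PySem.List.pySetD t i (PySem.List.pyGetD arr i none)) temp0
    let j := pvFindEmpty temp1 0 (pvLengthA temp1)
    PySem.List.pySetD temp1 j (some new_values)
  else
    let temp1 := (PySem.List.pyRange 1 ((pvLengthA arr : Int) + 1) 1).foldl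
      (fun t i => PySem.List.pySetD t i (PySem.List.pyGetD arr (i - 1) none)) temp0
    PySem.List.pySetD temp1 0 (some new_values)

-- ===== PORT B =====
-- arr.index(None) raises ValueError when None is absent (excluded by Pre_); getD 0 is unreachable there
def appends_alt (arr : List (Option Int)) (new_values : Int) (start_position : Bool) : List (Option Int) :=
  let n : Nat := if arr = [] then 0 else (PySem.List.index? arr none).getD 0
  if start_position = false then
    PySem.List.slice arr none (some (n : Int)) ++ [some new_values, none]
  else
    some new_values :: (PySem.List.slice arr none (some (n : Int)) ++ [none])

-- ===== PRECONDITION & SPEC =====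
-- Pre_ excludes exactly the inputs on which A raises (IndexError in length()'s scan):
-- a nonempty list with no None terminator.  B raises there too (ValueError from index()).
def Pre_appends (arr : List (Option Int)) (new_values : Int) (start_position : Bool) : Prop :=
  arr = [] ∨ none ∈ arr
instance (arr : List (Option Int)) (new_values : Int) (start_position : Bool) : Decidable (Pre_appends arr new_values start_position) := by unfold Pre_appends; infer_instance

def pvWitness_appends : List (Option Int) × Int × Bool := ([some 1, some 2, none], 5, false)

def Spec_appends (arr : List (Option Int)) (new_values : Int) (start_position : Bool) (out : List (Option Int)) : Prop := out = appends_alt arr new_values start_position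
instance (arr : List (Option Int)) (new_values : Int) (start_position : Bool) (out : List (Option Int)) : Decidable (Spec_appends arr new_values start_position out) := by unfold Spec_appends; infer_instance

-- ===== CLAIM (what is proved, stated in full; the proofs are below) =====
def Claim_equal_appends : Prop := ∀ (arr : List (Option Int)) (new_values : Int) (start_position : Bool), Dom_appends arr new_values start_position → Pre_appends arr new_values start_position → Spec_appends arr new_values start_position (appends arr new_values start_position)

-- ===== LEMMAS AND PROOFS =====

theorem scanLen_le (arr : List (Option Int)) : pvScanLen arr ≤ arr.length := by
  induction arr with
  | nil => simp [pvScanLen]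
  | cons x t ih => cases x <;> simp [pvScanLen] <;> omega

theorem take_scanLen_ne_none (arr : List (Option Int)) :
    ∀ x ∈ arr.take (pvScanLen arr), x ≠ none := by
  induction arr with
  | nil => simp
  | cons a t ih =>
    cases a with
    | none => simp [pvScanLen]
    | some v =>
      intro x hx
      simp only [pvScanLen, List.take_succ_cons, List.mem_cons] at hx
      rcases hx with rfl | hx
      · simp
      · exact ih x hx

theorem index?_eq_scanLen (arr : List (Option Int)) (h : none ∈ arr) :
    PySem.List.index? arr none = some (pvScanLen arr) := by
  induction arr with
  | nil => simp at h
  | cons a t ih =>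
    cases a with
    | none => simp [pvScanLen, PySem.List.index?_eq_idxOf?, List.idxOf?_cons]
    | some v =>
      simp only [PySem.List.index?_eq_idxOf?] at ih ⊢
      rw [List.idxOf?_cons]
      simp only [pvScanLen]
      rw [ih (by simpa using h)]
      simp

theorem lengthA_eq (arr : List (Option Int)) : pvLengthA arr = pvScanLen arr := by
  unfold pvLengthA
  split
  · simp [*, pvScanLen]
  · rfl

-- the copy loop of A's first branch on a fresh None buffer
theorem copy_loop (arr : List (Option Int)) :
    ∀ (n k : Nat), n ≤ arr.length →
    (List.range n).foldl (fun t i => t.set i (arr.getD i none))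
        (List.replicate (n + k) none)
      = arr.take n ++ List.replicate k none := by
  intro n
  induction n with
  | zero => intro k _; simp
  | succ m ih =>
    intro k hm
    have h1 : m + 1 + k = m + (k + 1) := by omega
    rw [List.range_succ, List.foldl_append, h1, ih (k + 1) (by omega)]
    have hlen : (arr.take m).length = m := by simp; omega
    have hm' : m < arr.length := by omega
    simp only [List.foldl_cons, List.foldl_nil]
    rw [List.set_append_right _ _ (by omega)]
    rw [hlen, Nat.sub_self]
    have harr : arr.getD m none = arr[m] := by simp [List.getD, List.getElem?_eq_getElem hm']
    have htake : arr.take (m + 1) = arr.take m ++ [arr[m]] := by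
      rw [List.take_add_one]
      simp [List.getElem?_eq_getElem hm']
    simp only [List.replicate_succ, List.set_cons_zero, harr, htake, List.append_assoc,
      List.cons_append, List.nil_append]

-- prepending a cell shifts every set-index by one
theorem foldl_set_succ (g : Nat → Option Int) (l : List Nat) :
    ∀ (x : Option Int) (t : List (Option Int)),
    l.foldl (fun t i => t.set (i + 1) (g i)) (x :: t)
      = x :: l.foldl (fun t i => t.set i (g i)) t := by
  induction l with
  | nil => intro x t; simp
  | cons a l ih => intro x t; simp only [List.foldl_cons, List.set_cons_succ]; exact ih x _

-- findEmptyArrayIndex on the filled buffer returns the first terminator slot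
theorem findEmpty_spec (l : List (Option Int)) (hl : ∀ x ∈ l, x ≠ none) :
    ∀ (i : Nat), i ≤ l.length →
    pvFindEmpty (l ++ [none, none]) i l.length = (l.length : Int) := by
  intro i hi
  induction hn : l.length - i generalizing i with
  | zero =>
    have hi' : i = l.length := by omega
    subst hi'
    unfold pvFindEmpty
    have h0 : PySem.List.pyGet? (l ++ [none, none]) (l.length : Int) = some none := by
      simpa using PySem.List.pyGet?_append_length (pre := l) (y := (none : Option Int)) (ys := [none])
    have hlen2 : (l ++ [none, none]).length = l.length + 2 := by simp
    have h1 : PySem.List.pyGet? (l ++ [none, none]) (-1) = some none := by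
      rw [PySem.List.pyGet?_neg_one]
      simp [List.getLast?_append]
    have h2 : PySem.List.pyGet? (l ++ [none, none]) (-2) = some none := by
      rw [PySem.List.pyGet?_neg_ofNat _ 2 (by omega) (by simp)]
      rw [hlen2, show l.length + 2 - 2 = l.length by omega]
      simp
    simp [h1, h2]
  | succ m ih =>
    have hi' : i < l.length := by omega
    unfold pvFindEmpty
    have hget : PySem.List.pyGet? (l ++ [none, none]) (i : Int) = some l[i] := by
      rw [PySem.List.pyGet?_natCast]
      simp [List.getElem?_append_left hi', List.getElem?_eq_getElem hi']
    have hne : l[i] ≠ none := hl _ (List.getElem_mem _)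
    have : ¬ (PySem.List.pyGet? (l ++ [none, none]) (i : Int) = some none ∧
          PySem.List.pyGet? (l ++ [none, none]) (-2) = some none ∧
          PySem.List.pyGet? (l ++ [none, none]) (-1) = some none) := by
      rw [hget]; simp; intro h; exact absurd h hne
    rw [if_neg (by omega), if_neg this]
    exact ih (i + 1) (by omega) (by omega)

theorem scanLen_replicate_like (l : List (Option Int)) (hl : ∀ x ∈ l, x ≠ none) :
    pvScanLen (l ++ [none, none]) = l.length := by
  induction l with
  | nil => simp [pvScanLen]
  | cons a t ih =>
    cases a with
    | none => exact absurd rfl (hl none (by simp))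
    | some v =>
      simp only [List.cons_append, pvScanLen, List.length_cons]
      rw [ih (fun x hx => hl x (by simp [hx]))]

-- first branch of A, fully evaluated
theorem appends_false_eq (arr : List (Option Int)) (nv : Int) :
    appends arr nv false = arr.take (pvScanLen arr) ++ [some nv, none] := by
  have hle : pvScanLen arr ≤ arr.length := scanLen_le arr
  unfold appends
  simp only [if_pos rfl]
  rw [lengthA_eq]
  set n := pvScanLen arr with hn
  have hrange : PySem.List.pyRange 0 (n : Int) 1 = (List.range n).map (fun (k : Nat) => (k : Int)) := by
    rw [PySem.List.pyRange_one]
    simp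
  have hcopy :
      (PySem.List.pyRange 0 (n : Int) 1).foldl
        (fun t i => PySem.List.pySetD t i (PySem.List.pyGetD arr i none))
        (List.replicate (n + 2) none)
      = arr.take n ++ [none, none] := by
    rw [hrange, List.foldl_map]
    simp only [PySem.List.pySetD_natCast, PySem.List.pyGetD_natCast]
    have := copy_loop arr n 2 hle
    simpa using this
  rw [hcopy]
  have hne := take_scanLen_ne_none arr
  have hscan : pvLengthA (arr.take n ++ [none, none]) = (arr.take n).length := by
    rw [lengthA_eq]
    exact scanLen_replicate_like _ (by simpa [hn] using hne)
  rw [hscan, findEmpty_spec _ (by simpa [hn] using hne) 0 (by omega)]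
  have hlt : (arr.take n).length = n := by simp; omega
  rw [show ((arr.take n).length : Int) = (((arr.take n).length : Nat) : Int) by simp,
      PySem.List.pySetD_natCast]
  rw [show (arr.take n).length = (arr.take n).length + 0 by omega,
      List.set_append_right _ _ (by omega)]
  simp

-- second branch of A, fully evaluated
theorem appends_true_eq (arr : List (Option Int)) (nv : Int) :
    appends arr nv true = some nv :: (arr.take (pvScanLen arr) ++ [none]) := by
  have hle : pvScanLen arr ≤ arr.length := scanLen_le arr
  unfold appends
  simp only [if_neg (by decide : ¬ (true = false))]
  rw [lengthA_eq]
  set n := pvScanLen arr with hn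
  have hrange : PySem.List.pyRange 1 ((n : Int) + 1) 1 = (List.range n).map (fun (k : Nat) => (1 : Int) + (k : Int)) := by
    rw [PySem.List.pyRange_one]
    simp
  have hrepl : List.replicate (n + 2) (none : Option Int) = none :: List.replicate (n + 1) none := by
    simp [List.replicate_succ]
  have hfold :
      (PySem.List.pyRange 1 ((n : Int) + 1) 1).foldl
        (fun t i => PySem.List.pySetD t i (PySem.List.pyGetD arr (i - 1) none))
        (List.replicate (n + 2) none)
      = none :: (arr.take n ++ [none]) := by
    rw [hrange, List.foldl_map, hrepl]
    have hfun : (fun (t : List (Option Int)) (k : Nat) =>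
        PySem.List.pySetD t (1 + (k : Int)) (PySem.List.pyGetD arr (1 + (k : Int) - 1) none))
          = fun t k => t.set (k + 1) (arr.getD k none) := by
      funext t k
      rw [show (1 : Int) + (k : Int) - 1 = ((k : Nat) : Int) by omega,
          show (1 : Int) + (k : Int) = (((k + 1 : Nat)) : Int) by omega,
          PySem.List.pySetD_natCast, PySem.List.pyGetD_natCast]
    rw [hfun, foldl_set_succ (fun k => arr.getD k none)]
    have := copy_loop arr n 1 hle
    rw [this]
    simp
  rw [hfold, show (0 : Int) = ((0 : Nat) : Int) by simp, PySem.List.pySetD_natCast]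
  simp

-- B, fully evaluated (under Pre_, B's n is the same first-None index)
theorem appends_alt_eq (arr : List (Option Int)) (nv : Int) (sp : Bool)
    (h : Pre_appends arr nv sp) :
    appends_alt arr nv sp =
      if sp = false then arr.take (pvScanLen arr) ++ [some nv, none]
      else some nv :: (arr.take (pvScanLen arr) ++ [none]) := by
  unfold appends_alt
  have hn : (if arr = [] then 0 else (PySem.List.index? arr none).getD 0) = pvScanLen arr := by
    rcases h with rfl | hmem
    · simp [pvScanLen]
    · have : arr ≠ [] := by rintro rfl; simp at hmem
      rw [if_neg this, index?_eq_scanLen arr hmem]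
      rfl
  rw [hn]
  simp only [PySem.List.slice_to_natCast]

-- ===== VERDICT (by name: the statement is the Claim_ definition above) =====
theorem appends_spec : Claim_equal_appends := by
  intro arr nv sp _ hpre
  unfold Spec_appends
  rw [appends_alt_eq arr nv sp hpre]
  cases sp with
  | false => simpa using appends_false_eq arr nv
  | true => simpa using appends_true_eq arr nv
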